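-- pv_equiv track=rewrite | github.com/lizhiquan/advent-of-code | 2024/day-07/main.py | part_one
-- ===== SOURCE A (Python) =====
-- def part_one(equations):
--     def test(result, nums, i, accu):
--         if accu > result:
--             return False
--         if i == len(nums):
--             return accu == result
--         return test(result, nums, i + 1, accu + nums[i]) or test(
--             result, nums, i + 1, accu * nums[i]
--         )
--
--     return sum(
--         result for result, nums in equations if test(result, nums[1:], 0, nums[0])
--     )
-- ===== SOURCE B (Python) =====
-- def part_one(equations):
--     total = 0
--     for result, nums in equations:
--         reachable = {nums[0]} if nums[0] <= result else set()
--         for n in nums[1:]: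
--             nxt = set()
--             for a in reachable:
--                 s = a + n
--                 if s <= result:
--                     nxt.add(s)
--                 p = a * n
--                 if p <= result:
--                     nxt.add(p)
--             reachable = nxt
--         if result in reachable:
--             total += result
--     return total
-- ===== Notes on version B (the rewrite author's own statement) =====
-- stated objective: alternative
-- what changed: Replaces A's depth-first recursion over +/* operator choices with an iterative DP that maintains the set of reachable accumulated values (pruning values above the target at every step) and checks membership of the target at the end.
-- outside the precondition, e.g. on part_one([(5, [])]): A raises IndexError, B raises IndexError
import Mathlib
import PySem

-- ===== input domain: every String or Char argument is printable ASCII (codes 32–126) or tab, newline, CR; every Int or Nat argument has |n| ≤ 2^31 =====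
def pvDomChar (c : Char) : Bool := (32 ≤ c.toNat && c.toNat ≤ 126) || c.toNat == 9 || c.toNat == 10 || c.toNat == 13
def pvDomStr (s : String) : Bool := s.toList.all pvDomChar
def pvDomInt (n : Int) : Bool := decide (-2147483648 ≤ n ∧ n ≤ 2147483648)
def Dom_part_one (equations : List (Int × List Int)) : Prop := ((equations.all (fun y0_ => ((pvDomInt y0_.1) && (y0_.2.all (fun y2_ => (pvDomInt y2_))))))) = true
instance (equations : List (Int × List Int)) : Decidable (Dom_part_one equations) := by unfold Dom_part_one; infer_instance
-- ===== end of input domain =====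

-- B replaces A's depth-first recursion over operator choices by an iterative DP over a
-- maintained set of reachable accumulated values (objective: alternative decomposition).


-- ===== PORT A =====
-- test(result, nums, i, accu): i only ever takes values ≤ len(nums) (it starts at 0 and
-- stops when i == len), so the stop test 'i == len(nums)' is written 'nums.length ≤ i'
-- for termination; nums[i] (in range in the recursive branch) is nums.getD i 0.
def testA (result : Int) (nums : List Int) (i : Nat) (accu : Int) : Bool :=
  if result < accu then false
  else if _h : nums.length ≤ i then accu == result
  else testA result nums (i + 1) (accu + nums.getD i 0)
        || testA result nums (i + 1) (accu * nums.getD i 0)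
termination_by nums.length - i
decreasing_by all_goals omega

-- sum(result for result, nums in equations if test(result, nums[1:], 0, nums[0]));
-- nums[0] is headD 0 (Pre_ excludes the empty nums, where Python raises IndexError).
def part_one (equations : List (Int × List Int)) : Int :=
  equations.foldl
    (fun s e =>
      if testA e.1 (PySem.List.slice e.2 (some 1) none) 0 (e.2.headD 0) then s + e.1 else s)
    0

-- ===== PORT B =====
-- one DP step: nxt = { a+n, a*n : a ∈ reach, kept only when ≤ result }
def stepB (result n : Int) (reach : PySem.Set Int) : PySem.Set Int :=
  reach.foldl
    (fun nxt a =>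
      let nxt1 := if a + n ≤ result then PySem.Set.add nxt (a + n) else nxt
      if a * n ≤ result then PySem.Set.add nxt1 (a * n) else nxt1)
    PySem.Set.empty

def part_one_alt (equations : List (Int × List Int)) : Int :=
  equations.foldl
    (fun total e =>
      let result := e.1
      let h0 := e.2.headD 0
      let init : PySem.Set Int :=
        if h0 ≤ result then PySem.Set.add PySem.Set.empty h0 else PySem.Set.empty
      let reach := (PySem.List.slice e.2 (some 1) none).foldl (fun r n => stepB result n r) init
      if PySem.Set.contains reach result then total + result else total)
    0

-- ===== PRECONDITION & SPEC =====
-- Pre_ excludes equations containing an empty nums list, on which A raises IndexError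
-- at nums[0].
def Pre_part_one (equations : List (Int × List Int)) : Prop :=
  ∀ e ∈ equations, e.2 ≠ []
instance (equations : List (Int × List Int)) : Decidable (Pre_part_one equations) := by
  unfold Pre_part_one; infer_instance

def pvWitness_part_one : (List (Int × List Int)) := [(5, [2, 3]), (7, [2, 3])]

def Spec_part_one (equations : List (Int × List Int)) (out : Int) : Prop := out = part_one_alt equations
instance (equations : List (Int × List Int)) (out : Int) : Decidable (Spec_part_one equations out) := by unfold Spec_part_one; infer_instance

-- ===== CLAIM (what is proved, stated in full; the proofs are below) =====
def Claim_equal_part_one : Prop := ∀ (equations : List (Int × List Int)), Dom_part_one equations → Pre_part_one equations → Spec_part_one equations (part_one equations)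

-- ===== LEMMAS AND PROOFS =====

-- A's recursion rephrased on the remaining suffix of nums (proof vehicle only).
def testRest (result : Int) : List Int → Int → Bool
  | rest, accu =>
    if result < accu then false
    else match rest with
      | [] => accu == result
      | n :: t => testRest result t (accu + n) || testRest result t (accu * n)

theorem testRest_of_gt {r b : Int} (h : r < b) (rest : List Int) :
    testRest r rest b = false := by
  cases rest <;> simp [testRest, h]

theorem testA_eq_testRest_aux (r : Int) (nums : List Int) :
    ∀ k i, nums.length - i ≤ k → i ≤ nums.length →
      ∀ accu, testA r nums i accu = testRest r (nums.drop i) accu := by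
  intro k
  induction k with
  | zero =>
    intro i hk hi accu
    have : i = nums.length := by omega
    subst this
    rw [testA]
    by_cases hgt : r < accu
    · simp [hgt, testRest_of_gt hgt]
    · simp [hgt, testRest, List.drop_length]
  | succ k ih =>
    intro i hk hi accu
    rw [testA]
    by_cases hgt : r < accu
    · simp [hgt, testRest_of_gt hgt]
    · simp only [hgt, if_false]
      by_cases hend : nums.length ≤ i
      · have : i = nums.length := le_antisymm hi hend
        subst this
        simp [testRest, hgt, List.drop_length]
      · have hlt : i < nums.length := lt_of_not_ge hend
        have hdrop : nums.drop i = nums[i] :: nums.drop (i + 1) :=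
          List.drop_eq_getElem_cons hlt
        simp only [dif_neg hend]
        rw [ih (i + 1) (by omega) (by omega), ih (i + 1) (by omega) (by omega)]
        rw [hdrop]
        simp [testRest, hgt, List.getElem?_eq_getElem hlt]

theorem testA_eq_testRest (r : Int) (nums : List Int) :
    ∀ i, i ≤ nums.length → ∀ accu, testA r nums i accu = testRest r (nums.drop i) accu :=
  fun i hi => testA_eq_testRest_aux r nums (nums.length - i) i (le_refl _) hi

theorem mem_stepB {r n b : Int} {reach : PySem.Set Int} :
    b ∈ stepB r n reach ↔
      ∃ a ∈ reach, (b = a + n ∧ a + n ≤ r) ∨ (b = a * n ∧ a * n ≤ r) := by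
  unfold stepB
  have hacc : ∀ (x : Int) (init : PySem.Set Int),
      b ∈ (let nxt1 := if x + n ≤ r then PySem.Set.add init (x + n) else init
           if x * n ≤ r then PySem.Set.add nxt1 (x * n) else nxt1) ↔
        b ∈ init ∨ (b = x + n ∧ x + n ≤ r) ∨ (b = x * n ∧ x * n ≤ r) := by
    intro x init
    by_cases h1 : x + n ≤ r <;> by_cases h2 : x * n ≤ r <;>
      simp [h1, h2, PySem.Set.mem_add] <;> tauto
  -- generalize the foldl accumulator
  suffices h : ∀ (l : List Int) (init : PySem.Set Int),
      (b ∈ l.foldl (fun nxt a =>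
        let nxt1 := if a + n ≤ r then PySem.Set.add nxt (a + n) else nxt
        if a * n ≤ r then PySem.Set.add nxt1 (a * n) else nxt1) init ↔
        b ∈ init ∨ ∃ a ∈ l, (b = a + n ∧ a + n ≤ r) ∨ (b = a * n ∧ a * n ≤ r)) by
    simpa [PySem.Set.empty] using h reach PySem.Set.empty
  intro l
  induction l with
  | nil => intro init; simp
  | cons x xs ih =>
    intro init
    simp only [List.foldl_cons, ih, hacc, List.mem_cons]
    constructor
    · rintro ((hmem | hx) | ⟨a, ha, hcase⟩)
      · exact Or.inl hmem
      · exact Or.inr ⟨x, Or.inl rfl, hx⟩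
      · exact Or.inr ⟨a, Or.inr ha, hcase⟩
    · rintro (hmem | ⟨a, rfl | ha, hcase⟩)
      · exact Or.inl (Or.inl hmem)
      · exact Or.inl (Or.inr hcase)
      · exact Or.inr ⟨a, ha, hcase⟩

theorem mem_stepB_le {r n b : Int} {reach : PySem.Set Int} (h : b ∈ stepB r n reach) :
    b ≤ r := by
  rcases mem_stepB.mp h with ⟨a, _, ⟨rfl, hle⟩ | ⟨rfl, hle⟩⟩ <;> exact hle

theorem contains_foldl_stepB (r : Int) :
    ∀ (rest : List Int) (reach : PySem.Set Int), (∀ a ∈ reach, a ≤ r) →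
      PySem.Set.contains (rest.foldl (fun s n => stepB r n s) reach) r
        = reach.any (fun a => testRest r rest a) := by
  intro rest
  induction rest with
  | nil =>
    intro reach hinv
    rw [Bool.eq_iff_iff]
    simp only [List.foldl_nil, PySem.Set.contains_iff, List.any_eq_true]
    constructor
    · intro hr
      exact ⟨r, hr, by simp [testRest]⟩
    · rintro ⟨a, ha, hta⟩
      have hle := hinv a ha
      have : ¬ r < a := not_lt.mpr hle
      simp only [testRest, this, if_false] at hta
      have : a = r := by simpa using hta
      exact this ▸ ha
  | cons n t ih =>
    intro reach hinv
    rw [List.foldl_cons, ih (stepB r n reach) (fun a ha => mem_stepB_le ha)]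
    rw [Bool.eq_iff_iff]
    simp only [List.any_eq_true]
    constructor
    · rintro ⟨b, hb, htb⟩
      rcases mem_stepB.mp hb with ⟨a, ha, ⟨rfl, _⟩ | ⟨rfl, _⟩⟩
      · exact ⟨a, ha, by simp [testRest, not_lt.mpr (hinv a ha), htb]⟩
      · exact ⟨a, ha, by simp [testRest, not_lt.mpr (hinv a ha), htb]⟩
    · rintro ⟨a, ha, hta⟩
      simp only [testRest, not_lt.mpr (hinv a ha), if_false, Bool.or_eq_true] at hta
      rcases hta with h1 | h2
      · have hle : a + n ≤ r := by
          by_contra hgt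
          rw [testRest_of_gt (lt_of_not_ge hgt)] at h1
          exact Bool.false_ne_true h1
        exact ⟨a + n, mem_stepB.mpr ⟨a, ha, Or.inl ⟨rfl, hle⟩⟩, h1⟩
      · have hle : a * n ≤ r := by
          by_contra hgt
          rw [testRest_of_gt (lt_of_not_ge hgt)] at h2
          exact Bool.false_ne_true h2
        exact ⟨a * n, mem_stepB.mpr ⟨a, ha, Or.inr ⟨rfl, hle⟩⟩, h2⟩

-- per-equation agreement of the two decision procedures (nums nonempty)
theorem per_equation (r : Int) (h : Int) (t : List Int) :
    (let init : PySem.Set Int :=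
        if h ≤ r then PySem.Set.add PySem.Set.empty h else PySem.Set.empty
     PySem.Set.contains (t.foldl (fun s n => stepB r n s) init) r)
      = testA r t 0 h := by
  rw [testA_eq_testRest r t 0 (by omega) h, List.drop_zero]
  by_cases hle : h ≤ r
  · have : (if h ≤ r then PySem.Set.add PySem.Set.empty h else PySem.Set.empty)
        = [h] := by simp [hle, PySem.Set.add, PySem.Set.empty]
    simp only [this]
    rw [contains_foldl_stepB r t [h] (by intro a ha; simp at ha; omega)]
    simp
  · have : (if h ≤ r then PySem.Set.add PySem.Set.empty h else PySem.Set.empty)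
        = ([] : List Int) := by simp [hle, PySem.Set.empty]
    simp only [this]
    rw [contains_foldl_stepB r t [] (by intro a ha; simp at ha)]
    simp [testRest_of_gt (lt_of_not_ge hle)]

-- top-level fold over the equations, accumulator generalized
theorem fold_eq (es : List (Int × List Int)) (hpre : ∀ e ∈ es, e.2 ≠ []) :
    ∀ s : Int,
      es.foldl
        (fun s e =>
          if testA e.1 (PySem.List.slice e.2 (some 1) none) 0 (e.2.headD 0) then s + e.1 else s)
        s
      = es.foldl
        (fun total e =>
          let result := e.1
          let h0 := e.2.headD 0
          let init : PySem.Set Int :=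
            if h0 ≤ result then PySem.Set.add PySem.Set.empty h0 else PySem.Set.empty
          let reach := (PySem.List.slice e.2 (some 1) none).foldl (fun r n => stepB result n r) init
          if PySem.Set.contains reach result then total + result else total)
        s := by
  induction es with
  | nil => intro s; rfl
  | cons e es ih =>
    intro s
    obtain ⟨h, t, he⟩ : ∃ h t, e.2 = h :: t := by
      cases hx : e.2 with
      | nil => exact absurd hx (hpre e (by simp))
      | cons h t => exact ⟨h, t, rfl⟩
    simp only [List.foldl_cons]
    rw [ih (fun x hx => hpre x (by simp [hx]))]
    congr 1
    simp only [he, PySem.List.slice_from_one, List.tail_cons, List.headD_cons]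
    rw [per_equation e.1 h t]

-- ===== VERDICT (by name: the statement is the Claim_ definition above) =====
theorem part_one_spec : Claim_equal_part_one := by
  unfold Claim_equal_part_one
  intro equations _hdom hpre
  unfold Spec_part_one part_one part_one_alt
  exact fold_eq equations hpre 0
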